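-- pv_equiv track=rewrite | github.com/a-dirir/wep-app-backend | server/router.py | check_resource_customer_access
-- ===== SOURCE A (Python) =====
-- def check_resource_customer_access(permission, customers, resources):
--     deny = permission.get('deny')
--     allow = permission.get('allow')
--
--     for customer in customers:
--         if deny is not None:
--             if customer in deny['customers']:
--                 return False
--         if allow is not None:
--             if customer not in allow['customers'] and allow['customers'] != ['*']:
--                 return False
--
--     for resource in resources:
--         if deny is not None:
--             if resource in deny['resources']:
--                 return False
--         if allow is not None:
--             if resource not in allow['resources'] and allow['resources'] != ['*']:
--                 return False
--
--     return True
-- ===== SOURCE B (Python) =====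
-- def check_resource_customer_access(permission, customers, resources):
--     deny = permission.get('deny')
--     allow = permission.get('allow')
--
--     if customers:
--         if deny is not None and set(customers) & set(deny['customers']):
--             return False
--         if allow is not None and allow['customers'] != ['*'] and not set(customers) <= set(allow['customers']):
--             return False
--
--     if resources:
--         if deny is not None and set(resources) & set(deny['resources']):
--             return False
--         if allow is not None and allow['resources'] != ['*'] and not set(resources) <= set(allow['resources']):
--             return False
--
--     return True
-- ===== Notes on version B (the rewrite author's own statement) =====
-- stated objective: idiomatic
-- what changed: Replaces the two element-wise loops with whole-collection set operations: one deny check via set intersection and one allow check via set inclusion per collection, guarded on non-empty collections to keep A's lazy key access.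
import Mathlib
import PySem

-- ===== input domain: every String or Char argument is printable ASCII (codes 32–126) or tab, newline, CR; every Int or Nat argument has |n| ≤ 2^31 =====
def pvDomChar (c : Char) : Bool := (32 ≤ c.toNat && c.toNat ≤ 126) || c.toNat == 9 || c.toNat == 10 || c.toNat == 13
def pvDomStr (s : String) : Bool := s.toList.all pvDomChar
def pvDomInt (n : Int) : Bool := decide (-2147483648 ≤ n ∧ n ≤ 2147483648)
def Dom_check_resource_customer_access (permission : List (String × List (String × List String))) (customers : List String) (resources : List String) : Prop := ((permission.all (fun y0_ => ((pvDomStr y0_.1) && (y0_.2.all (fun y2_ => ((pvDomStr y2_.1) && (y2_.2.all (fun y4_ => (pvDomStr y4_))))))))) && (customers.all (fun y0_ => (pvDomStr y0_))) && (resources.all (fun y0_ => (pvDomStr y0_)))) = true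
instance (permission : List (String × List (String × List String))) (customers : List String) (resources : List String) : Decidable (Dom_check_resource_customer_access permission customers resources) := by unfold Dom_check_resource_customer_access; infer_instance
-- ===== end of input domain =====

-- Header: B replaces A's two element-wise loops by one set-intersection (deny) and one
-- set-inclusion (allow) test per collection, guarded on non-empty collections; idiomatic, same result.

-- ===== PORT A =====
-- deny['customers'] etc. is totalized by getD []; Pre_ excludes exactly the inputs where the
-- Python A raises KeyError, so on Pre_ the getD is exact.
def crcaDenied (deny : Option (List (String × List String))) (key : String) (x : String) : Bool :=
  match deny with
  | some d => ((PySem.Dict.mk d).getD key []).contains x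
  | none => false

def crcaAllowFail (allow : Option (List (String × List String))) (key : String) (x : String) : Bool :=
  match allow with
  | some a =>
      let l := (PySem.Dict.mk a).getD key []
      !l.contains x && decide (l ≠ ["*"])
  | none => false

-- one 'for' loop of A: returns false as soon as some element is denied or fails allow
def crcaLoop (deny allow : Option (List (String × List String))) (key : String) : List String → Bool
  | [] => true
  | x :: rest =>
      if crcaDenied deny key x then false
      else if crcaAllowFail allow key x then false
      else crcaLoop deny allow key rest

def check_resource_customer_access (permission : List (String × List (String × List String))) (customers : List String) (resources : List String) : Bool :=
  let deny := (PySem.Dict.mk permission).get? "deny"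
  let allow := (PySem.Dict.mk permission).get? "allow"
  crcaLoop deny allow "customers" customers && crcaLoop deny allow "resources" resources

-- ===== PORT B =====
def check_resource_customer_access_alt (permission : List (String × List (String × List String))) (customers : List String) (resources : List String) : Bool :=
  let deny := (PySem.Dict.mk permission).get? "deny"
  let allow := (PySem.Dict.mk permission).get? "allow"
  if !customers.isEmpty &&
     (match deny with
      | some d => !(PySem.Set.inter (PySem.Set.ofList customers)
                      (PySem.Set.ofList ((PySem.Dict.mk d).getD "customers" []))).isEmpty
      | none => false) then false
  else if !customers.isEmpty &&
     (match allow with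
      | some a => decide ((PySem.Dict.mk a).getD "customers" [] ≠ ["*"]) &&
                  !(PySem.Set.issubset (PySem.Set.ofList customers)
                      (PySem.Set.ofList ((PySem.Dict.mk a).getD "customers" [])))
      | none => false) then false
  else if !resources.isEmpty &&
     (match deny with
      | some d => !(PySem.Set.inter (PySem.Set.ofList resources)
                      (PySem.Set.ofList ((PySem.Dict.mk d).getD "resources" []))).isEmpty
      | none => false) then false
  else if !resources.isEmpty &&
     (match allow with
      | some a => decide ((PySem.Dict.mk a).getD "resources" [] ≠ ["*"]) &&
                  !(PySem.Set.issubset (PySem.Set.ofList resources)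
                      (PySem.Set.ofList ((PySem.Dict.mk a).getD "resources" [])))
      | none => false) then false
  else true

-- ===== PRECONDITION & SPEC =====
-- true iff the optional dict o, when present, has key k (A raises KeyError on a present dict missing it)
def crcaHasKey (o : Option (List (String × List String))) (k : String) : Bool :=
  match o with
  | some d => (PySem.Dict.mk d).contains k
  | none => true

-- Pre_ excludes exactly the inputs on which the Python A raises a KeyError: a non-empty customers
-- list with a present deny/allow dict lacking 'customers' (the allow access only reached when the
-- first customer is not denied), and the symmetric 'resources' case, reached only when every
-- customer passed the first loop.
def Pre_check_resource_customer_access (permission : List (String × List (String × List String))) (customers : List String) (resources : List String) : Prop :=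
  (let deny := (PySem.Dict.mk permission).get? "deny"
   let allow := (PySem.Dict.mk permission).get? "allow"
   ((match customers with
     | [] => false
     | c :: _ =>
        !crcaHasKey deny "customers" ||
        (!crcaHasKey allow "customers" && !crcaDenied deny "customers" c)) ||
    (customers.all (fun c => !crcaDenied deny "customers" c && !crcaAllowFail allow "customers" c) &&
     match resources with
     | [] => false
     | r :: _ =>
        !crcaHasKey deny "resources" ||
        (!crcaHasKey allow "resources" && !crcaDenied deny "resources" r)))) = false

instance (permission : List (String × List (String × List String))) (customers : List String) (resources : List String) : Decidable (Pre_check_resource_customer_access permission customers resources) := by unfold Pre_check_resource_customer_access; infer_instance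

def pvWitness_check_resource_customer_access : (List (String × List (String × List String))) × List String × List String :=
  ([("allow", [("customers", ["acme"]), ("resources", ["*"])]),
    ("deny", [("customers", ["evil"]), ("resources", ["r9"])])],
   ["acme"], ["r1"])

def Spec_check_resource_customer_access (permission : List (String × List (String × List String))) (customers : List String) (resources : List String) (out : Bool) : Prop := out = check_resource_customer_access_alt permission customers resources
instance (permission : List (String × List (String × List String))) (customers : List String) (resources : List String) (out : Bool) : Decidable (Spec_check_resource_customer_access permission customers resources out) := by unfold Spec_check_resource_customer_access; infer_instance

-- ===== CLAIM (what is proved, stated in full; the proofs are below) =====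
def Claim_equal_check_resource_customer_access : Prop := ∀ (permission : List (String × List (String × List String))) (customers : List String) (resources : List String), Dom_check_resource_customer_access permission customers resources → Pre_check_resource_customer_access permission customers resources → Spec_check_resource_customer_access permission customers resources (check_resource_customer_access permission customers resources)

-- ===== LEMMAS AND PROOFS =====

-- A's loop returns false iff some element is denied or fails the allow test
theorem crcaLoop_eq_all (deny allow : Option (List (String × List String))) (key : String) (xs : List String) :
    crcaLoop deny allow key xs = xs.all (fun x => !crcaDenied deny key x && !crcaAllowFail allow key x) := by
  induction xs with
  | nil => rfl
  | cons x rest ih =>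
      simp only [crcaLoop, List.all_cons, ← ih]
      by_cases h1 : crcaDenied deny key x <;> by_cases h2 : crcaAllowFail allow key x <;>
        simp [h1, h2]

theorem inter_isEmpty_iff {xs ys : List String} :
    (PySem.Set.inter (PySem.Set.ofList xs) (PySem.Set.ofList ys)).isEmpty = true ↔
      ∀ x ∈ xs, x ∉ ys := by
  rw [List.isEmpty_iff, List.eq_nil_iff_forall_not_mem]
  constructor
  · intro h x hx hy
    exact h x (by rw [PySem.Set.mem_inter]; exact ⟨(PySem.Set.mem_ofList xs x).2 hx, (PySem.Set.mem_ofList ys x).2 hy⟩)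
  · intro h x hx
    rw [PySem.Set.mem_inter, PySem.Set.mem_ofList, PySem.Set.mem_ofList] at hx
    exact h x hx.1 hx.2

theorem issubset_ofList_iff {xs ys : List String} :
    PySem.Set.issubset (PySem.Set.ofList xs) (PySem.Set.ofList ys) = true ↔ ∀ x ∈ xs, x ∈ ys := by
  rw [PySem.Set.issubset_iff]
  constructor
  · intro h x hx
    exact (PySem.Set.mem_ofList ys x).1 (h x ((PySem.Set.mem_ofList xs x).2 hx))
  · intro h x hx
    exact (PySem.Set.mem_ofList ys x).2 (h x ((PySem.Set.mem_ofList xs x).1 hx))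

-- one collection: A's loop result equals the conjunction of B's two negated block tests
theorem crca_block_eq (deny allow : Option (List (String × List String))) (key : String) (xs : List String) :
    crcaLoop deny allow key xs =
      (!(!xs.isEmpty &&
         (match deny with
          | some d => !(PySem.Set.inter (PySem.Set.ofList xs)
                          (PySem.Set.ofList ((PySem.Dict.mk d).getD key []))).isEmpty
          | none => false)) &&
       !(!xs.isEmpty &&
         (match allow with
          | some a => decide ((PySem.Dict.mk a).getD key [] ≠ ["*"]) &&
                      !(PySem.Set.issubset (PySem.Set.ofList xs)
                          (PySem.Set.ofList ((PySem.Dict.mk a).getD key [])))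
          | none => false))) := by
  rw [crcaLoop_eq_all, Bool.eq_iff_iff]
  rcases deny with _ | d <;> rcases allow with _ | a <;>
    simp only [crcaDenied, crcaAllowFail] <;>
    simp [List.all_eq_true, List.isEmpty_iff, inter_isEmpty_iff, issubset_ofList_iff,
          List.eq_nil_iff_forall_not_mem] <;>
    first
    | tauto
    | (by_cases hs : (PySem.Dict.mk a).getD key [] = ["*"] <;> simp [hs] <;>
       first
       | tauto
       | (refine ⟨fun h => ⟨Or.inr fun x hx => (h x hx).1, Or.inr fun x hx => (h x hx).2⟩, ?_⟩
          rintro ⟨h1 | h1, h2 | h2⟩ x hx <;>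
            first
            | exact absurd hx (h1 x)
            | exact absurd hx (h2 x)
            | exact ⟨h1 x hx, h2 x hx⟩))

theorem crca_ifchain (c1 c2 c3 c4 : Bool) :
    (if c1 then false else if c2 then false else if c3 then false else if c4 then false else true) =
      ((!c1 && !c2) && (!c3 && !c4)) := by
  cases c1 <;> cases c2 <;> cases c3 <;> cases c4 <;> rfl

-- ===== VERDICT (by name: the statement is the Claim_ definition above) =====
theorem check_resource_customer_access_spec : Claim_equal_check_resource_customer_access := by
  intro permission customers resources _ _
  unfold Spec_check_resource_customer_access
  simp only [check_resource_customer_access, check_resource_customer_access_alt]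
  rw [crca_block_eq, crca_block_eq, crca_ifchain]
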